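-- pv_equiv track=rewrite | github.com/qodhrkawk/stockread | backend/app/report/generator.py | _format_news_section
-- ===== SOURCE A (Python) =====
-- def _format_news_section(news_items: list) -> str:
--     """뉴스 항목 → 포매팅된 텍스트"""
--     type_emoji = {
--         "bullish": "🟢",
--         "bearish": "🔴",
--         "caution": "🟡",
--     }
--     # 호재 → 주의 → 악재 순서로 정렬
--     type_order = {"bullish": 0, "caution": 1, "bearish": 2}
--     sorted_news = sorted(news_items, key=lambda x: type_order.get(x.get("type", "caution"), 1))
--
--     lines = []
--     for item in sorted_news:
--         emoji = type_emoji.get(item.get("type", "caution"), "🟡")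
--         headline = item.get("headline", "")
--         detail = item.get("detail", "")
--         lines.append(f"{emoji} {headline}")
--         if detail:
--             lines.append(f"→ {detail}")
--         lines.append("")  # 빈 줄
--
--     # 마지막 빈 줄 제거
--     if lines and lines[-1] == "":
--         lines.pop()
--
--     return "\n".join(lines)
-- ===== SOURCE B (Python) =====
-- def _format_news_section(news_items: list) -> str:
--     """One-pass bucket partition (bullish/caution/bearish) instead of a key sort,
--     and per-item block strings joined by blank lines instead of a flat line list."""
--     bullish, caution, bearish = [], [], []
--     for item in news_items:
--         t = item.get("type", "caution")
--         if t == "bullish":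
--             bullish.append(item)
--         elif t == "bearish":
--             bearish.append(item)
--         else:
--             caution.append(item)
--
--     blocks = []
--     for item in bullish + caution + bearish:
--         t = item.get("type", "caution")
--         if t == "bullish":
--             emoji = "🟢"
--         elif t == "bearish":
--             emoji = "🔴"
--         else:
--             emoji = "🟡"
--         block = f"{emoji} {item.get('headline', '')}"
--         detail = item.get("detail", "")
--         if detail:
--             block += f"\n→ {detail}"
--         blocks.append(block)
--     return "\n\n".join(blocks)
-- ===== Notes on version B (the rewrite author's own statement) =====
-- stated objective: simpler
-- what changed: Replaces the key-based comparison sort with a single-pass partition into three ordered buckets (bullish/caution/bearish, unknown types to caution) and replaces the flat line list with append-empty-line-then-pop bookkeeping by per-item block strings joined with '\n\n'.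
import Mathlib
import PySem

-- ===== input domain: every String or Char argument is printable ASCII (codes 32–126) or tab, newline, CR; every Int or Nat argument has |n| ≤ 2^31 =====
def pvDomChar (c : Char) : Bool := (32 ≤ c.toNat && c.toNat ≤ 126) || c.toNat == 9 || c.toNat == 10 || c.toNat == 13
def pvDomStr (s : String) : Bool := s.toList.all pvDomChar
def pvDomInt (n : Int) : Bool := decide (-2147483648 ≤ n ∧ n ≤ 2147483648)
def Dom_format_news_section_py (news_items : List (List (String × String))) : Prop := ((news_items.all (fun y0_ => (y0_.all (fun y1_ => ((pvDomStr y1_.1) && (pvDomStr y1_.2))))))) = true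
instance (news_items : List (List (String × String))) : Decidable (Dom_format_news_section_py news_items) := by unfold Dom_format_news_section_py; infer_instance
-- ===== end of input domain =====

-- B replaces A's key sort by a one-pass three-bucket partition and A's flat line list
-- (with trailing-blank bookkeeping) by per-item blocks joined with blank lines; same result.

-- item.get(k, d) on the dict (association list, first match)
def pyDictGetD (item : List (String × String)) (k d : String) : String :=
  match List.lookup k item with | some v => v | none => d

-- ===== PORT A =====
def typeEmojiA : PySem.Dict String String :=
  PySem.Dict.ofList [("bullish", "🟢"), ("bearish", "🔴"), ("caution", "🟡")]
def typeOrderA : PySem.Dict String Int :=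
  PySem.Dict.ofList [("bullish", 0), ("caution", 1), ("bearish", 2)]
def keyA (item : List (String × String)) : Int :=
  typeOrderA.getD (pyDictGetD item "type" "caution") 1

def format_news_section_py (news_items : List (List (String × String))) : String :=
  let sorted_news := PySem.List.sorted news_items keyA false
  let lines := sorted_news.foldl (fun acc item =>
    let emoji := typeEmojiA.getD (pyDictGetD item "type" "caution") "🟡"
    let headline := pyDictGetD item "headline" ""
    let detail := pyDictGetD item "detail" ""
    let acc := acc ++ [emoji ++ " " ++ headline]
    let acc := if detail ≠ "" then acc ++ ["→ " ++ detail] else acc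
    acc ++ [""]) []
  let lines := if lines ≠ [] ∧ PySem.List.pyGet? lines (-1) = some "" then lines.dropLast else lines
  PySem.Str.join "\n" lines

-- ===== PORT B =====
def typeOf (item : List (String × String)) : String := pyDictGetD item "type" "caution"
def emojiOf (t : String) : String :=
  if t = "bullish" then "🟢" else if t = "bearish" then "🔴" else "🟡"
def blockOf (item : List (String × String)) : String :=
  let block := emojiOf (typeOf item) ++ " " ++ pyDictGetD item "headline" ""
  let detail := pyDictGetD item "detail" ""
  if detail ≠ "" then block ++ ("\n→ " ++ detail) else block

def format_news_section_py_alt (news_items : List (List (String × String))) : String :=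
  let buckets := news_items.foldl
    (fun (acc : List (List (String × String)) × List (List (String × String)) × List (List (String × String))) item =>
      let t := typeOf item
      if t = "bullish" then (acc.1 ++ [item], acc.2.1, acc.2.2)
      else if t = "bearish" then (acc.1, acc.2.1, acc.2.2 ++ [item])
      else (acc.1, acc.2.1 ++ [item], acc.2.2)) ([], [], [])
  let blocks := (buckets.1 ++ buckets.2.1 ++ buckets.2.2).map blockOf
  PySem.Str.join "\n\n" blocks

-- ===== PRECONDITION & SPEC =====
def Spec_format_news_section_py (news_items : List (List (String × String))) (out : String) : Prop := out = format_news_section_py_alt news_items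
instance (news_items : List (List (String × String))) (out : String) : Decidable (Spec_format_news_section_py news_items out) := by unfold Spec_format_news_section_py; infer_instance

-- ===== CLAIM (what is proved, stated in full; the proofs are below) =====
def Claim_equal_format_news_section_py : Prop := ∀ (news_items : List (List (String × String))), Dom_format_news_section_py news_items → Spec_format_news_section_py news_items (format_news_section_py news_items)

-- ===== LEMMAS AND PROOFS =====

-- abbreviations used only by the proofs
def hdOf (item : List (String × String)) : String :=
  emojiOf (typeOf item) ++ " " ++ pyDictGetD item "headline" ""
def dtOf (item : List (String × String)) : String := pyDictGetD item "detail" ""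
def gLines (item : List (String × String)) : List String :=
  [hdOf item] ++ (if dtOf item ≠ "" then ["→ " ++ dtOf item] else []) ++ [""]
def F0 (xs : List (List (String × String))) : List (List (String × String)) :=
  xs.filter (fun it => typeOf it == "bullish")
def F2 (xs : List (List (String × String))) : List (List (String × String)) :=
  xs.filter (fun it => typeOf it == "bearish")
def F1 (xs : List (List (String × String))) : List (List (String × String)) :=
  xs.filter (fun it => !(typeOf it == "bullish") && !(typeOf it == "bearish"))

theorem str_ext (a b : String) (h : a.toList = b.toList) : a = b := by
  have := congrArg String.ofList h
  simpa using this

theorem orderD_eq (t : String) :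
    typeOrderA.getD t 1 = if t = "bullish" then 0 else if t = "bearish" then 2 else 1 := by
  have hd : typeOrderA = PySem.Dict.mk [("bullish", 0), ("caution", 1), ("bearish", 2)] := by decide
  rw [hd]
  by_cases h1 : t = "bullish"
  · subst h1; decide
  · by_cases h2 : t = "bearish"
    · subst h2; decide
    · by_cases h3 : t = "caution"
      · subst h3; decide
      · simp only [PySem.Dict.getD, PySem.Dict.get?_mk_cons]
        rw [if_neg (fun h => h1 (eq_of_beq h).symm), if_neg (fun h => h3 (eq_of_beq h).symm),
            if_neg (fun h => h2 (eq_of_beq h).symm), if_neg h1, if_neg h2]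
        rfl

theorem emojiD_eq (t : String) : typeEmojiA.getD t "🟡" = emojiOf t := by
  have hd : typeEmojiA = PySem.Dict.mk [("bullish", "🟢"), ("bearish", "🔴"), ("caution", "🟡")] := by decide
  rw [hd]
  by_cases h1 : t = "bullish"
  · subst h1; decide
  · by_cases h2 : t = "bearish"
    · subst h2; decide
    · by_cases h3 : t = "caution"
      · subst h3; decide
      · simp only [PySem.Dict.getD, PySem.Dict.get?_mk_cons, emojiOf]
        rw [if_neg (fun h => h1 (eq_of_beq h).symm), if_neg (fun h => h2 (eq_of_beq h).symm),
            if_neg (fun h => h3 (eq_of_beq h).symm), if_neg h1, if_neg h2]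
        rfl

theorem keyA_eq (it : List (String × String)) :
    keyA it = if typeOf it = "bullish" then 0 else if typeOf it = "bearish" then 2 else 1 := by
  unfold keyA
  exact orderD_eq (typeOf it)

theorem insertBy_append_left {α : Type} (b : α → α → Bool) (x : α) (ys zs : List α)
    (h : ∀ y ∈ ys, b x y = false) :
    PySem.List.insertBy b x (ys ++ zs) = ys ++ PySem.List.insertBy b x zs := by
  induction ys with
  | nil => simp
  | cons y ys ih =>
    have hy := h y (by simp)
    simp only [List.cons_append, PySem.List.insertBy, hy]
    simp [ih (fun y hm => h y (by simp [hm]))]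

theorem insertBy_head {α : Type} (b : α → α → Bool) (x : α) (zs : List α)
    (h : ∀ y ∈ zs, b x y = true) : PySem.List.insertBy b x zs = x :: zs := by
  cases zs with
  | nil => simp [PySem.List.insertBy]
  | cons z zs => simp [PySem.List.insertBy, h z (by simp)]

theorem foldl_ins (xs : List (List (String × String))) :
    ∀ a0 a1 a2 : List (List (String × String)),
    (∀ y ∈ a0, keyA y = 0) → (∀ y ∈ a1, keyA y = 1) → (∀ y ∈ a2, keyA y = 2) →
    xs.foldl (fun acc x => PySem.List.insertBy (fun a b => decide (keyA a < keyA b)) x acc)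
      (a0 ++ a1 ++ a2)
      = (a0 ++ F0 xs) ++ (a1 ++ F1 xs) ++ (a2 ++ F2 xs) := by
  induction xs with
  | nil => intro a0 a1 a2 _ _ _; simp [F0, F1, F2]
  | cons x xs ih =>
    intro a0 a1 a2 h0 h1 h2
    simp only [List.foldl_cons]
    by_cases tb : typeOf x = "bullish"
    · have hk : keyA x = 0 := by rw [keyA_eq]; simp [tb]
      have hskip : ∀ y ∈ a0, (fun a b => decide (keyA a < keyA b)) x y = false := by
        intro y hy; simp [hk, h0 y hy]
      have hall : ∀ y ∈ a1 ++ a2, (fun a b => decide (keyA a < keyA b)) x y = true := by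
        intro y hy
        rcases List.mem_append.mp hy with h | h
        · simp [hk, h1 y h]
        · simp [hk, h2 y h]
      rw [List.append_assoc a0 a1 a2, insertBy_append_left _ _ _ _ hskip,
          insertBy_head _ _ _ hall]
      have hsh : a0 ++ x :: (a1 ++ a2) = (a0 ++ [x]) ++ a1 ++ a2 := by simp
      have hm0 : ∀ y ∈ a0 ++ [x], keyA y = 0 := by
        intro y hy
        rcases List.mem_append.mp hy with h | h
        · exact h0 y h
        · simp at h; subst h; exact hk
      rw [hsh, ih (a0 ++ [x]) a1 a2 hm0 h1 h2]
      simp [F0, F1, F2, tb]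
    · by_cases tr : typeOf x = "bearish"
      · have hk : keyA x = 2 := by rw [keyA_eq]; simp [tr]
        have hskip : ∀ y ∈ a0 ++ a1 ++ a2, (fun a b => decide (keyA a < keyA b)) x y = false := by
          intro y hy
          rcases List.mem_append.mp hy with h | h
          · rcases List.mem_append.mp h with h' | h'
            · simp [hk, h0 y h']
            · simp [hk, h1 y h']
          · simp [hk, h2 y h]
        rw [PySem.List.insertBy_of_forall_not_before _ _ _ hskip]
        have hsh : (a0 ++ a1 ++ a2) ++ [x] = a0 ++ a1 ++ (a2 ++ [x]) := by simp
        have hm2 : ∀ y ∈ a2 ++ [x], keyA y = 2 := by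
          intro y hy
          rcases List.mem_append.mp hy with h | h
          · exact h2 y h
          · simp at h; subst h; exact hk
        rw [hsh, ih a0 a1 (a2 ++ [x]) h0 h1 hm2]
        simp [F0, F1, F2, tr]
      · have hk : keyA x = 1 := by rw [keyA_eq]; simp [tb, tr]
        have hskip : ∀ y ∈ a0 ++ a1, (fun a b => decide (keyA a < keyA b)) x y = false := by
          intro y hy
          rcases List.mem_append.mp hy with h | h
          · simp [hk, h0 y h]
          · simp [hk, h1 y h]
        have hall : ∀ y ∈ a2, (fun a b => decide (keyA a < keyA b)) x y = true := by
          intro y hy; simp [hk, h2 y hy]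
        rw [insertBy_append_left _ _ _ _ hskip, insertBy_head _ _ _ hall]
        have hsh : (a0 ++ a1) ++ x :: a2 = a0 ++ (a1 ++ [x]) ++ a2 := by simp
        have hm1 : ∀ y ∈ a1 ++ [x], keyA y = 1 := by
          intro y hy
          rcases List.mem_append.mp hy with h | h
          · exact h1 y h
          · simp at h; subst h; exact hk
        rw [hsh, ih a0 (a1 ++ [x]) a2 h0 hm1 h2]
        simp [F0, F1, F2, tb, tr]

theorem sorted_eq_buckets (xs : List (List (String × String))) :
    PySem.List.sorted xs keyA false = F0 xs ++ F1 xs ++ F2 xs := by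
  rw [PySem.List.sorted_eq_foldl_insertBy]
  simpa using foldl_ins xs [] [] [] (by simp) (by simp) (by simp)

theorem buckets_fold (xs : List (List (String × String))) :
    ∀ b c r : List (List (String × String)),
    xs.foldl
      (fun (acc : List (List (String × String)) × List (List (String × String)) × List (List (String × String))) item =>
        if typeOf item = "bullish" then (acc.1 ++ [item], acc.2.1, acc.2.2)
        else if typeOf item = "bearish" then (acc.1, acc.2.1, acc.2.2 ++ [item])
        else (acc.1, acc.2.1 ++ [item], acc.2.2)) (b, c, r)
      = (b ++ F0 xs, c ++ F1 xs, r ++ F2 xs) := by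
  induction xs with
  | nil => intro b c r; simp [F0, F1, F2]
  | cons x xs ih =>
    intro b c r
    simp only [List.foldl_cons]
    by_cases tb : typeOf x = "bullish"
    · rw [if_pos tb, ih (b ++ [x]) c r]
      simp [F0, F1, F2, tb]
    · by_cases tr : typeOf x = "bearish"
      · rw [if_neg tb, if_pos tr, ih b c (r ++ [x])]
        simp [F0, F1, F2, tr]
      · rw [if_neg tb, if_neg tr, ih b (c ++ [x]) r]
        simp [F0, F1, F2, tb, tr]

theorem lines_fold (ys : List (List (String × String))) (acc : List String) :
    ys.foldl (fun acc item =>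
      (if pyDictGetD item "detail" "" ≠ ""
       then acc ++ [typeEmojiA.getD (pyDictGetD item "type" "caution") "🟡" ++ " " ++
              pyDictGetD item "headline" ""] ++ ["→ " ++ pyDictGetD item "detail" ""]
       else acc ++ [typeEmojiA.getD (pyDictGetD item "type" "caution") "🟡" ++ " " ++
              pyDictGetD item "headline" ""]) ++ [""]) acc = acc ++ ys.flatMap gLines := by
  induction ys generalizing acc with
  | nil => simp
  | cons y ys ih =>
    simp only [List.foldl_cons]
    rw [ih]
    by_cases hdt : pyDictGetD y "detail" "" ≠ ""
    · simp [gLines, hdOf, dtOf, typeOf, emojiD_eq, hdt]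
    · simp [gLines, hdOf, dtOf, typeOf, emojiD_eq, hdt]

theorem join_cons_cons_str (s a b : String) (t : List String) :
    PySem.Str.join s (a :: b :: t) = a ++ s ++ PySem.Str.join s (b :: t) := by
  simp [PySem.Str.join, PySem.Chars.join_cons_cons, String.append_assoc]

theorem join_singleton_str (s a : String) : PySem.Str.join s [a] = a := by
  simp [PySem.Str.join, PySem.Chars.join_singleton]

theorem flat_blocks (it : List (String × String)) (rest : List (List (String × String))) :
    ∃ K, (it :: rest).flatMap gLines = K ++ [""] ∧ K ≠ [] ∧
      PySem.Str.join "\n" K = PySem.Str.join "\n\n" ((it :: rest).map blockOf) := by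
  induction rest generalizing it with
  | nil =>
    by_cases hdt : dtOf it ≠ ""
    · refine ⟨[hdOf it, "→ " ++ dtOf it], by simp [gLines, hdt], by simp, ?_⟩
      rw [join_cons_cons_str, join_singleton_str]
      simp only [List.map_cons, List.map_nil, join_singleton_str]
      simp only [dtOf] at hdt
      apply str_ext
      simp [blockOf, hdOf, dtOf, hdt]
    · refine ⟨[hdOf it], by simp [gLines, hdt], by simp, ?_⟩
      rw [join_singleton_str]
      simp only [List.map_cons, List.map_nil, join_singleton_str]
      simp only [dtOf, ne_eq, not_not] at hdt
      apply str_ext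
      simp [blockOf, hdOf, hdt]
  | cons r t ih =>
    obtain ⟨K, hK, hne, hJ⟩ := ih r
    obtain ⟨k0, K', rfl⟩ := List.exists_cons_of_ne_nil hne
    refine ⟨gLines it ++ (k0 :: K'), ?_, by simp [gLines], ?_⟩
    · rw [List.flatMap_cons, hK]
      simp
    · have hmap : (it :: r :: t).map blockOf = blockOf it :: (r :: t).map blockOf := by simp
      rw [hmap]
      have hm2 : ∃ m ms, (r :: t).map blockOf = m :: ms := by simp
      obtain ⟨m, ms, hm⟩ := hm2
      rw [hm, join_cons_cons_str]
      rw [hm] at hJ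
      by_cases hdt : dtOf it ≠ ""
      · have : gLines it ++ (k0 :: K') = hdOf it :: ("→ " ++ dtOf it) :: "" :: k0 :: K' := by
          simp [gLines, hdt]
        rw [this, join_cons_cons_str, join_cons_cons_str, join_cons_cons_str, ← hJ]
        simp only [dtOf] at hdt
        apply str_ext
        simp [blockOf, hdOf, dtOf, hdt]
      · have : gLines it ++ (k0 :: K') = hdOf it :: "" :: k0 :: K' := by
          simp [gLines, hdt]
        rw [this, join_cons_cons_str, join_cons_cons_str, ← hJ]
        simp only [dtOf, ne_eq, not_not] at hdt
        apply str_ext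
        simp [blockOf, hdOf, hdt]

theorem join_flat (L : List (List (String × String))) :
    PySem.Str.join "\n"
      (if L.flatMap gLines ≠ [] ∧ PySem.List.pyGet? (L.flatMap gLines) (-1) = some ""
       then (L.flatMap gLines).dropLast else L.flatMap gLines)
      = PySem.Str.join "\n\n" (L.map blockOf) := by
  cases L with
  | nil => rfl
  | cons it rest =>
    obtain ⟨K, hK, hne, hJ⟩ := flat_blocks it rest
    rw [hK]
    rw [if_pos ⟨by simp, PySem.List.pyGet?_neg_one_append_singleton K ""⟩]
    rw [List.dropLast_concat]
    exact hJ

-- ===== VERDICT (by name: the statement is the Claim_ definition above) =====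
theorem format_news_section_py_spec : Claim_equal_format_news_section_py := by
  intro news_items _
  unfold Spec_format_news_section_py
  simp only [format_news_section_py, format_news_section_py_alt]
  rw [sorted_eq_buckets, buckets_fold news_items [] [] [], lines_fold]
  simpa using join_flat (F0 news_items ++ F1 news_items ++ F2 news_items)
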